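-- pv_equiv track=rewrite | github.com/takechi-scratch/atcoder | abc440/c/main.py | solve
-- ===== SOURCE A (Python) =====
-- def solve(N: int, W: int, C: list[int]):
--     ans_sum = [0] * (2 * W)
--     for i, x in enumerate(C):
--         ans_sum[i % (2 * W)] += x
--
--     now_ans = sum(ans_sum[:W])
--     ans = now_ans
--     for start in range(2 * W):
--         now_ans -= ans_sum[start]
--         now_ans += ans_sum[(start + W) % (2 * W)]
--         ans = min(ans, now_ans)
--
--     return ans
-- ===== SOURCE B (Python) =====
-- def solve(N: int, W: int, C: list[int]):
--     ans_sum = [0] * (2 * W)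
--     for i, x in enumerate(C):
--         ans_sum[i % (2 * W)] += x
--
--     doubled = ans_sum + ans_sum
--     pref = [0]
--     for v in doubled:
--         pref.append(pref[-1] + v)
--
--     return min(pref[s + W] - pref[s] for s in range(2 * W))
-- ===== Notes on version B (the rewrite author's own statement) =====
-- stated objective: alternative
-- what changed: Replaces the stateful sliding window (running subtract/add with a carried minimum) by a prefix-sum table over the doubled array and a direct min over all 2W window differences.
-- outside the precondition, e.g. on solve(0, 0, []): A returns 0, B raises ValueError; on solve(2, -1, []): A returns 0, B raises ValueError
import Mathlib
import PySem

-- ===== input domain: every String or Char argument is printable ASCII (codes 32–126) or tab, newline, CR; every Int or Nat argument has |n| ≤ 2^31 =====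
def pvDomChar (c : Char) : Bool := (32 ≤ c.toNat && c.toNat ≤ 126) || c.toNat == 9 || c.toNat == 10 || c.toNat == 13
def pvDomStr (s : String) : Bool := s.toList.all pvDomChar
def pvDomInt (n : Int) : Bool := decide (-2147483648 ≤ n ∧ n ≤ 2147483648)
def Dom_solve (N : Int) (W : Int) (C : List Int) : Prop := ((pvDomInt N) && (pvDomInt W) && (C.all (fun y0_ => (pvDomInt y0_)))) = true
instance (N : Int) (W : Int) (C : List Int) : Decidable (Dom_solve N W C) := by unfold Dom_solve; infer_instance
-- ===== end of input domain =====

-- B replaces A's stateful sliding-window minimum by a prefix-sum table over the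
-- doubled array and a direct minimum over all 2W window differences (alternative decomposition).

-- ===== PORT A =====
-- shared aggregation loop: `ans_sum = [0]*(2*W); for i, x in enumerate(C): ans_sum[i % (2*W)] += x`
-- (identical in A and B, so both ports use this helper; Python's list is ported as Array,
--  the in-range update `ans_sum[j] += x` as setIfInBounds/getD — exact for W > 0 (Pre_),
--  where j = i % (2*W) is always a valid nonnegative index)
def pvBuild (W : Int) (C : List Int) : Array Int :=
  (PySem.List.enumerate C 0).foldl
    (fun a p =>
      let j := PySem.Int.mod p.1 (2 * W)
      a.setIfInBounds j.toNat (a.getD j.toNat 0 + p.2))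
    (Array.replicate (2 * W).toNat 0)

def solve (N : Int) (W : Int) (C : List Int) : Int :=
  let ansSum := pvBuild W C
  let nowAns := (PySem.List.slice ansSum.toList none (some W)).sum
  -- exact for W > 0 (Pre_): both indices are nonnegative and < 2*W = len(ans_sum)
  let st := (PySem.List.pyRange 0 (2 * W) 1).foldl
    (fun (s : Int × Int) start =>
      let n := s.1 - ansSum.getD start.toNat 0
                  + ansSum.getD (PySem.Int.mod (start + W) (2 * W)).toNat 0
      (n, min s.2 n))
    (nowAns, nowAns)
  st.2

-- ===== PORT B =====
def solve_alt (N : Int) (W : Int) (C : List Int) : Int :=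
  let ansSum := pvBuild W C
  let doubled := ansSum ++ ansSum
  -- `pref[-1]` ported as getD (size-1): exact, pref starts as [0] and only grows
  let pref := doubled.foldl (fun p v => p.push (p.getD (p.size - 1) 0 + v)) #[(0 : Int)]
  -- exact for W > 0 (Pre_): s and s+W are nonnegative indices < len(pref)
  ((PySem.List.pyRange 0 (2 * W) 1).map
      (fun s => pref.getD (s + W).toNat 0 - pref.getD s.toNat 0)
    |> (PySem.List.min? · (fun y => y))).getD 0
  -- `.getD 0` totalises Python's `min(...)`, which raises on an empty sequence (only when W ≤ 0, outside Pre_)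

-- ===== PRECONDITION & SPEC =====
-- Pre_ excludes W ≤ 0: there A raises (ZeroDivisionError/IndexError) for non-empty C, and for
-- empty C A's accidental 0 is met by B's min() over an empty sequence raising ValueError.
def Pre_solve (N : Int) (W : Int) (C : List Int) : Prop := 0 < W
instance (N : Int) (W : Int) (C : List Int) : Decidable (Pre_solve N W C) := by unfold Pre_solve; infer_instance
def pvWitness_solve : Int × Int × List Int := (3, 2, [1, 2, 3])

def Spec_solve (N : Int) (W : Int) (C : List Int) (out : Int) : Prop := out = solve_alt N W C
instance (N : Int) (W : Int) (C : List Int) (out : Int) : Decidable (Spec_solve N W C out) := by unfold Spec_solve; infer_instance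

-- ===== CLAIM (what is proved, stated in full; the proofs are below) =====
def Claim_equal_solve : Prop := ∀ (N : Int) (W : Int) (C : List Int), Dom_solve N W C → Pre_solve N W C → Spec_solve N W C (solve N W C)

-- ===== LEMMAS AND PROOFS =====

-- cyclic window sum: sum of w entries of L++L starting at k
def wsum (L : List Int) (w k : Nat) : Int := (((L ++ L).drop k).take w).sum

lemma arrGetD (a : Array Int) (i : Nat) (d : Int) : a.getD i d = a.toList.getD i d := by
  rcases Nat.lt_or_ge i a.size with h | h
  · simp [Array.getD, h]
  · simp [Array.getD, Nat.not_lt.mpr h]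

lemma foldl_upd_size (W : Int) (l : List (Int × Int)) :
    ∀ (a : Array Int),
      (l.foldl (fun a p =>
        let j := PySem.Int.mod p.1 (2 * W)
        a.setIfInBounds j.toNat (a.getD j.toNat 0 + p.2)) a).size = a.size := by
  induction l with
  | nil => intro a; rfl
  | cons p t ih => intro a; simp only [List.foldl_cons]; rw [ih, Array.size_setIfInBounds]

lemma pvBuild_size (W : Int) (C : List Int) : (pvBuild W C).size = (2 * W).toNat := by
  unfold pvBuild
  rw [foldl_upd_size, Array.size_replicate]

lemma wsum_zero (L : List Int) (w : Nat) (h : w ≤ L.length) :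
    wsum L w 0 = (L.take w).sum := by
  simp [wsum, List.take_append_of_le_length h]

lemma wsum_last (L : List Int) (w : Nat) (hL : L.length = 2 * w) :
    wsum L w (2 * w) = wsum L w 0 := by
  have h1 : (L ++ L).drop (2 * w) = L := by rw [← hL]; exact List.drop_left
  have h2 : (L ++ L).take w = L.take w := List.take_append_of_le_length (by omega)
  simp [wsum, h1, h2]

lemma pref_window (l : List Int) (s w : Nat) :
    (l.take (s + w)).sum - (l.take s).sum = ((l.drop s).take w).sum := by
  rw [List.take_add, List.sum_append]; ring

lemma wsum_eq_pref (L : List Int) (w k : Nat) :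
    wsum L w k = ((L ++ L).take (k + w)).sum - ((L ++ L).take k).sum := by
  unfold wsum; exact (pref_window (L ++ L) k w).symm

lemma S_succ (l : List Int) (j : Nat) (hj : j < l.length) :
    (l.take (j + 1)).sum = (l.take j).sum + l[j] := by
  simpa using List.sum_take_succ l j hj

lemma wsum_step (L : List Int) (w k : Nat) (hL : L.length = 2 * w) (hk : k < 2 * w) :
    wsum L w (k + 1) = wsum L w k - L.getD k 0 + L.getD ((k + w) % (2 * w)) 0 := by
  have hlen : (L ++ L).length = 4 * w := by simp [hL]; omega
  have hk4 : k < (L ++ L).length := by omega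
  have hkw4 : k + w < (L ++ L).length := by omega
  have e1 : k + 1 + w = k + w + 1 := by omega
  rw [wsum_eq_pref, wsum_eq_pref, e1, S_succ _ _ hkw4, S_succ _ _ hk4]
  have h1 : (L ++ L)[k]'hk4 = L.getD k 0 := by
    rw [List.getElem_append_left (by omega), List.getD_eq_getElem _ _ (by omega)]
  have h2 : (L ++ L)[k + w]'hkw4 = L.getD ((k + w) % (2 * w)) 0 := by
    by_cases hc : k + w < 2 * w
    · have hm : (k + w) % (2 * w) = k + w := Nat.mod_eq_of_lt hc
      rw [hm, List.getElem_append_left (by omega), List.getD_eq_getElem _ _ (by omega)]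
    · have hm : (k + w) % (2 * w) = k + w - 2 * w := by
        rw [Nat.mod_eq_sub_mod (by omega)]; exact Nat.mod_eq_of_lt (by omega)
      rw [hm, List.getElem_append_right (by omega), List.getD_eq_getElem _ _ (by omega)]
      simp only [hL]
  rw [h1, h2]; ring

-- the prefix array built by B's fold, as a list of partial sums
lemma pref_eq (d : List Int) :
    (d.foldl (fun p v => p.push (p.getD (p.size - 1) 0 + v)) #[(0 : Int)]).toList
      = (List.range (d.length + 1)).map (fun k => (d.take k).sum) := by
  induction d using List.reverseRecOn with
  | nil => rfl
  | append_singleton d v ih =>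
    have hsz : (d.foldl (fun p v => p.push (p.getD (p.size - 1) 0 + v)) #[(0 : Int)]).size
        = d.length + 1 := by
      have h := congrArg List.length ih
      rw [Array.length_toList] at h
      simpa using h
    rw [List.foldl_append, List.foldl_cons, List.foldl_nil, Array.toList_push, arrGetD, hsz, ih]
    have hlast : ((List.range (d.length + 1)).map (fun k => (d.take k).sum)).getD
        (d.length + 1 - 1) 0 = d.sum := by
      simp only [Nat.add_sub_cancel]
      rw [PySem.List.getD_map_range _ _ _ _ (by omega), List.take_length]
    rw [hlast, List.length_append, List.length_singleton,
      List.range_succ (n := d.length + 1), List.map_append, List.map_singleton]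
    congr 1
    · apply List.map_congr_left
      intro k hk
      rw [List.mem_range] at hk
      rw [List.take_append_of_le_length (by omega)]
    · rw [List.take_of_length_le (by simp), List.sum_append, List.sum_singleton]

lemma foldA (L : List Int) (w : Nat) (hL : L.length = 2 * w) :
    ∀ (c j : Nat), j + c ≤ 2 * w → ∀ (a : Int),
      (List.range' j c).foldl
        (fun (s : Int × Int) k =>
          (s.1 - L.getD k 0 + L.getD ((k + w) % (2 * w)) 0,
           min s.2 (s.1 - L.getD k 0 + L.getD ((k + w) % (2 * w)) 0)))
        (wsum L w j, a)
      = (wsum L w (j + c), ((List.range' j c).map (fun k => wsum L w (k + 1))).foldl min a) := by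
  intro c
  induction c with
  | zero => intro j h a; simp
  | succ c ih =>
    intro j h a
    simp only [List.range'_succ, List.foldl_cons, List.map_cons]
    have hstep : wsum L w j - L.getD j 0 + L.getD ((j + w) % (2 * w)) 0 = wsum L w (j + 1) :=
      (wsum_step L w j hL (by omega)).symm
    rw [hstep, ih (j + 1) (by omega) (min a (wsum L w (j + 1)))]
    have e : j + 1 + c = j + (c + 1) := by omega
    rw [e]

lemma shift_map (L : List Int) (w : Nat) (n : Nat) :
    (List.range' 0 n).map (fun k => wsum L w (k + 1))
      = (List.range' 1 n).map (fun k => wsum L w k) := by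
  rw [← List.map_add_range' (a := 1) 0 n 1, List.map_map]
  apply List.map_congr_left
  intro k _
  simp [Nat.add_comm]

-- ===== VERDICT (by name: the statement is the Claim_ definition above) =====
theorem solve_spec : Claim_equal_solve := by
  intro N W C _ hPre
  unfold Spec_solve
  have hW : (0 : Int) < W := hPre
  lift W to ℕ using hW.le with w
  have hw : 0 < w := by exact_mod_cast hW
  simp only [solve, solve_alt]
  set L := (pvBuild (w : Int) C).toList with hLdef
  have h2w : (2 * (w : Int)) = ((2 * w : Nat) : Int) := by push_cast; ring
  have hL : L.length = 2 * w := by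
    rw [hLdef, Array.length_toList, pvBuild_size, h2w, Int.toNat_natCast]
  have hdl : (L ++ L).length = 4 * w := by
    rw [List.length_append, hL]; omega
  rw [h2w, PySem.List.pyRange_zero_natCast, PySem.List.slice_to_natCast,
    List.foldl_map, List.map_map]
  simp only [Function.comp_def, ← Nat.cast_add, PySem.Int.mod_natCast,
    Int.toNat_natCast, arrGetD, ← hLdef]
  rw [← wsum_zero L w (by omega)]
  have hfn : (fun (p : Array Int) (v : Int) => p.push (p.toList.getD (p.size - 1) 0 + v))
      = (fun (p : Array Int) (v : Int) => p.push (p.getD (p.size - 1) 0 + v)) := by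
    funext p v; rw [arrGetD]
  have hfold : ((pvBuild (w : Int) C ++ pvBuild (w : Int) C).foldl
        (fun p v => p.push (p.toList.getD (p.size - 1) 0 + v)) #[(0 : Int)]).toList
      = (List.range (4 * w + 1)).map (fun k => ((L ++ L).take k).sum) := by
    rw [hfn, ← Array.foldl_toList, Array.toList_append, ← hLdef, pref_eq, hdl]
  rw [hfold]
  -- B side: turn the mapped differences into window sums
  have hmapB : (List.range (2 * w)).map
      (fun k => ((List.range (4 * w + 1)).map (fun k => ((L ++ L).take k).sum)).getD (k + w) 0
        - ((List.range (4 * w + 1)).map (fun k => ((L ++ L).take k).sum)).getD k 0)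
      = (List.range (2 * w)).map (fun k => wsum L w k) := by
    apply List.map_congr_left
    intro k hk
    rw [List.mem_range] at hk
    rw [PySem.List.getD_map_range _ _ _ _ (by omega),
      PySem.List.getD_map_range _ _ _ _ (by omega), ← wsum_eq_pref]
  rw [hmapB]
  rw [List.range_eq_range', foldA L w hL (2 * w) 0 (by omega) (wsum L w 0)]
  obtain ⟨c, hc⟩ : ∃ c, 2 * w = c + 1 := ⟨2 * w - 1, by omega⟩
  show ((List.range' 0 (2 * w)).map (fun k => wsum L w (k + 1))).foldl min (wsum L w 0)
      = (PySem.List.min? ((List.range' 0 (2 * w)).map (fun k => wsum L w k))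
          (fun y => y)).getD 0
  rw [shift_map, hc]
  rw [List.range'_succ (s := 0) (n := c), List.map_cons, PySem.List.min?_id_cons,
    Option.getD_some]
  rw [List.range'_concat (s := 1) (n := c), List.map_append, List.map_singleton,
    List.foldl_append, List.foldl_cons, List.foldl_nil]
  simp only [Nat.zero_add]
  have hlastw : wsum L w (1 + 1 * c) = wsum L w 0 := by
    have e : 1 + 1 * c = 2 * w := by omega
    rw [e, wsum_last L w hL]
  rw [hlastw]
  exact min_eq_left (PySem.List.foldl_min_le _ _).1
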